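-- pv_equiv track=rewrite | github.com/dainsiahtill-dev/Polaris | src/backend/tests/agent_stress/contracts.py | _next_factory_stage
-- ===== SOURCE A (Python) =====
-- from typing import Any
--
-- FACTORY_STAGE_ORDER = {
--     "docs_generation": 0,
--     "pm_planning": 1,
--     "director_dispatch": 2,
--     "quality_gate": 3,
-- }
--
-- def normalize_text(value: Any) -> str:
--     return str(value or "").strip()
--
-- def normalize_status(value: Any) -> str:
--     return normalize_text(value).lower()
--
-- def _next_factory_stage(stage_name: str) -> str:
--     stage = normalize_status(stage_name)
--     if stage not in FACTORY_STAGE_ORDER: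
--         return ""
--     current_index = FACTORY_STAGE_ORDER[stage]
--     for candidate, candidate_index in FACTORY_STAGE_ORDER.items():
--         if candidate_index == current_index + 1:
--             return candidate
--     return ""
-- ===== SOURCE B (Python) =====
-- FACTORY_STAGES = ["docs_generation", "pm_planning", "director_dispatch", "quality_gate"]
--
-- _NEXT_STAGE = {cur: nxt for cur, nxt in zip(FACTORY_STAGES, FACTORY_STAGES[1:])}
--
-- def _next_factory_stage(stage_name: str) -> str:
--     stage = str(stage_name or "").strip().lower()
--     return _NEXT_STAGE.get(stage, "")
-- ===== Notes on version B (the rewrite author's own statement) =====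
-- stated objective: simpler
-- what changed: Replaces the membership test plus linear scan of the index dict with a successor map built once from the ordered stage list, so the body is a single dictionary lookup whose default covers both unknown and final stages.
import Mathlib
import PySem

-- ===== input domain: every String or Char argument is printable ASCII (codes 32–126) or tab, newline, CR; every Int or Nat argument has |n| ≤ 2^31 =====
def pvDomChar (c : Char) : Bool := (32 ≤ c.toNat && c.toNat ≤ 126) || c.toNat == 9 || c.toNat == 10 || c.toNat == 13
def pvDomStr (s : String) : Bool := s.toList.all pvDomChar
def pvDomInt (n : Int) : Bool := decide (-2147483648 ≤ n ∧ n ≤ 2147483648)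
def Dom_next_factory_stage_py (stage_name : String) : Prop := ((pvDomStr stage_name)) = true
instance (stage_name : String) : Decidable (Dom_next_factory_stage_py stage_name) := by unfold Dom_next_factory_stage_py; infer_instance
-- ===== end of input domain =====

-- B replaces A's membership test plus linear scan of the index dict by a successor map
-- built once from the ordered stage list, so the body is one lookup (objective: simpler).

-- ===== PORT A =====
-- FACTORY_STAGE_ORDER
def pvFactoryStageOrder : PySem.Dict String Int :=
  ((((PySem.Dict.empty).insert "docs_generation" 0).insert "pm_planning" 1).insert
    "director_dispatch" 2).insert "quality_gate" 3

-- the for-loop over FACTORY_STAGE_ORDER.items() with early return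
def pvScanA (ci : Int) : List (String × Int) → String
  | [] => ""
  | (c, i) :: rest => if i = ci + 1 then c else pvScanA ci rest

def next_factory_stage_py (stage_name : String) : String :=
  -- stage = normalize_status(stage_name) = str(stage_name or "").strip().lower(); for a str
  -- argument 'stage_name or ""' is stage_name itself when non-empty and "" otherwise, so
  -- this equals stage_name.strip().lower() in both cases
  let stage := PySem.Str.lower (PySem.Str.strip stage_name)
  if pvFactoryStageOrder.contains stage = false then ""
  else
    match pvFactoryStageOrder.get? stage with
    | none => ""   -- unreachable: guarded by the contains test (Python would raise KeyError)
    | some current_index => pvScanA current_index pvFactoryStageOrder.items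

-- ===== PORT B =====
-- FACTORY_STAGES
def pvFactoryStages : List String :=
  ["docs_generation", "pm_planning", "director_dispatch", "quality_gate"]

-- _NEXT_STAGE = {cur: nxt for cur, nxt in zip(FACTORY_STAGES, FACTORY_STAGES[1:])}
-- (FACTORY_STAGES[1:] = drop 1, exact since the index 1 is nonnegative)
def pvNextStage : PySem.Dict String String :=
  (pvFactoryStages.zip (pvFactoryStages.drop 1)).foldl
    (fun d p => d.insert p.1 p.2) PySem.Dict.empty

def next_factory_stage_py_alt (stage_name : String) : String :=
  let stage := PySem.Str.lower (PySem.Str.strip stage_name)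
  pvNextStage.getD stage ""

-- ===== PRECONDITION & SPEC =====
def Spec_next_factory_stage_py (stage_name : String) (out : String) : Prop := out = next_factory_stage_py_alt stage_name
instance (stage_name : String) (out : String) : Decidable (Spec_next_factory_stage_py stage_name out) := by unfold Spec_next_factory_stage_py; infer_instance

-- ===== CLAIM (what is proved, stated in full; the proofs are below) =====
def Claim_equal_next_factory_stage_py : Prop := ∀ (stage_name : String), Dom_next_factory_stage_py stage_name → Spec_next_factory_stage_py stage_name (next_factory_stage_py stage_name)

-- ===== LEMMAS AND PROOFS =====

-- For every normalized stage string the guarded scan of A equals B's successor lookup.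
lemma pvBody_eq (t : String) :
    (if pvFactoryStageOrder.contains t = false then ""
     else
       match pvFactoryStageOrder.get? t with
       | none => ""
       | some current_index => pvScanA current_index pvFactoryStageOrder.items)
    = pvNextStage.getD t "" := by
  by_cases h1 : t = "docs_generation"
  · subst h1; decide
  · by_cases h2 : t = "pm_planning"
    · subst h2; decide
    · by_cases h3 : t = "director_dispatch"
      · subst h3; decide
      · by_cases h4 : t = "quality_gate"
        · subst h4; decide
        · have h1' : ¬"docs_generation" = t := fun h => h1 h.symm
          have h2' : ¬"pm_planning" = t := fun h => h2 h.symm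
          have h3' : ¬"director_dispatch" = t := fun h => h3 h.symm
          have h4' : ¬"quality_gate" = t := fun h => h4 h.symm
          simp [pvFactoryStageOrder, pvNextStage, pvFactoryStages,
                PySem.Dict.contains, PySem.Dict.get?, PySem.Dict.getD,
                PySem.Dict.insert, PySem.Dict.empty, List.foldl, List.find?,
                beq_iff_eq, h1', h2', h3', h4',
                beq_eq_false_iff_ne.mpr h1', beq_eq_false_iff_ne.mpr h2',
                beq_eq_false_iff_ne.mpr h3', beq_eq_false_iff_ne.mpr h4']

-- ===== VERDICT (by name: the statement is the Claim_ definition above) =====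
theorem next_factory_stage_py_spec : Claim_equal_next_factory_stage_py := by
  intro s _
  show next_factory_stage_py s = next_factory_stage_py_alt s
  rw [next_factory_stage_py, next_factory_stage_py_alt]
  exact pvBody_eq (PySem.Str.lower (PySem.Str.strip s))
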